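-- pv_equiv track=rewrite | github.com/iree-org/aster | tools/migrate_inst_format.py | split_back_to_lines
-- ===== SOURCE A (Python) =====
-- def split_back_to_lines(joined_lines):
--     """Split joined lines back, preserving the original line structure."""
--     result = []
--     for line in joined_lines:
--         if "\n" in line:
--             parts = line.split("\n")
--             result.extend(parts)
--         else:
--             result.append(line)
--     return result
-- ===== SOURCE B (Python) =====
-- def split_back_to_lines(joined_lines):
--     """Split joined lines back, preserving the original line structure."""
--     if not joined_lines:
--         return []
--     return "\n".join(joined_lines).split("\n")
-- ===== Notes on version B (the rewrite author's own statement) =====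
-- stated objective: idiomatic
-- what changed: Replaces the per-line membership test, conditional split and extend by one global newline join followed by a single split, with an early empty-list return so the empty input keeps its empty result.
import Mathlib
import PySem

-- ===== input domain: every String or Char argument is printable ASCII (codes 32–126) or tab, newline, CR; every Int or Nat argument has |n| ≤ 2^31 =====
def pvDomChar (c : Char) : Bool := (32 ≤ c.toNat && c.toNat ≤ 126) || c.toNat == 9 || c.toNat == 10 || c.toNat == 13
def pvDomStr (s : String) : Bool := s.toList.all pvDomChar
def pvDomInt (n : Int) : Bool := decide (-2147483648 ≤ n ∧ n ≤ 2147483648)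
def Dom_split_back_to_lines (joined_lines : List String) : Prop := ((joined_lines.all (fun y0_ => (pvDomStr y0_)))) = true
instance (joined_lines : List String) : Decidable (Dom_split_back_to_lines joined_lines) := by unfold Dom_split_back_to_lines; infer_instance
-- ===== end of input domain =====

-- B replaces A's per-line membership test / split / extend loop by one global "\n".join
-- followed by a single split("\n") (with [] returned directly for the empty list); same output, idiomatic.


-- ===== PORT A =====
def split_back_to_lines (joined_lines : List String) : List String :=
  joined_lines.foldl (fun result line =>
    if PySem.Str.isIn "\n" line then
      result ++ (PySem.Str.split? line "\n").getD []   -- sep "\n" ≠ "", so split? is always some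
    else
      result ++ [line]) []

-- ===== PORT B =====
def split_back_to_lines_alt (joined_lines : List String) : List String :=
  if joined_lines.isEmpty then []
  else (PySem.Str.split? (PySem.Str.join "\n" joined_lines) "\n").getD []

-- ===== PRECONDITION & SPEC =====
def Spec_split_back_to_lines (joined_lines : List String) (out : List String) : Prop := out = split_back_to_lines_alt joined_lines
instance (joined_lines : List String) (out : List String) : Decidable (Spec_split_back_to_lines joined_lines out) := by unfold Spec_split_back_to_lines; infer_instance

-- ===== CLAIM (what is proved, stated in full; the proofs are below) =====
def Claim_equal_split_back_to_lines : Prop := ∀ (joined_lines : List String), Dom_split_back_to_lines joined_lines → Spec_split_back_to_lines joined_lines (split_back_to_lines joined_lines)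

-- ===== LEMMAS AND PROOFS =====

-- Reference single-char splitter with split accumulator, mirroring splitOn.go's state.
def mySplit (c : Char) (cur : List Char) : List Char → List (List Char)
  | [] => [cur.reverse]
  | c' :: rest => if c' = c then cur.reverse :: mySplit c [] rest else mySplit c (c' :: cur) rest

theorem go_eq_mySplit (c : Char) (l cur : List Char) (acc : List (List Char)) (fuel : Nat)
    (h : l.length < fuel) :
    PySem.Chars.splitOn.go [c] fuel l cur acc = acc.reverse ++ mySplit c cur l := by
  induction l generalizing cur acc fuel with
  | nil =>
      cases fuel with
      | zero => omega
      | succ n => simp [PySem.Chars.splitOn.go, mySplit]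
  | cons c' rest ih =>
      cases fuel with
      | zero => omega
      | succ n =>
        by_cases hc : c' = c
        · subst hc
          have hpre : List.isPrefixOf [c'] (c' :: rest) = true := by
            simp [List.isPrefixOf]
          simp only [PySem.Chars.splitOn.go, hpre, if_pos, List.length_cons, List.drop_succ_cons,
            List.length_nil, List.drop_zero]
          rw [ih _ _ _ (by simpa using h)]
          simp [mySplit]
        · have hpre : List.isPrefixOf [c] (c' :: rest) = false := by
            simp [List.isPrefixOf, Ne.symm hc]
          simp only [PySem.Chars.splitOn.go, hpre]
          rw [if_neg (by simp)]
          rw [ih _ _ _ (by simpa using h)]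
          simp [mySplit, hc]

theorem splitOn_eq_mySplit (c : Char) (s : List Char) :
    PySem.Chars.splitOn s [c] = mySplit c [] s := by
  have := go_eq_mySplit c s [] [] (s.length + 1) (by omega)
  simpa [PySem.Chars.splitOn] using this

theorem mySplit_not_mem (c : Char) (cur : List Char) (l : List Char) (h : c ∉ l) :
    mySplit c cur l = [cur.reverse ++ l] := by
  induction l generalizing cur with
  | nil => simp [mySplit]
  | cons c' rest ih =>
      have hc : c' ≠ c := by rintro rfl; exact h (by simp)
      simp [mySplit, hc, ih _ (fun hm => h (by simp [hm]))]

theorem mySplit_append (c : Char) (cur a b : List Char) :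
    mySplit c cur (a ++ c :: b) = mySplit c cur a ++ mySplit c [] b := by
  induction a generalizing cur with
  | nil => simp [mySplit]
  | cons a0 a' ih =>
      by_cases h : a0 = c
      · subst h; simp [mySplit, ih]
      · simp [mySplit, h, ih]

theorem mySplit_intercalate (c : Char) (p : List Char) (parts : List (List Char)) :
    mySplit c [] (PySem.Chars.join [c] (p :: parts)) = (p :: parts).flatMap (mySplit c []) := by
  induction parts generalizing p with
  | nil => simp [PySem.Chars.join, List.intercalate]
  | cons q rest ih =>
      rw [PySem.Chars.join_cons_cons]
      have : p ++ [c] ++ PySem.Chars.join [c] (q :: rest)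
           = p ++ c :: PySem.Chars.join [c] (q :: rest) := by simp
      rw [this, mySplit_append, ih]
      simp

-- per-line value of A's loop body
theorem a_line_eq (line : String) :
    (if PySem.Str.isIn "\n" line then (PySem.Str.split? line "\n").getD [] else [line])
      = (mySplit '\n' [] line.toList).map String.ofList := by
  by_cases h : PySem.Str.isIn "\n" line
  · simp only [h, if_pos]
    simp [PySem.Str.split?, PySem.Chars.split?, splitOn_eq_mySplit]
  · simp only [h]
    have hmem : '\n' ∉ line.toList := by
      intro hm
      apply h
      rw [PySem.Str.isIn_iff_infix]
      obtain ⟨s, t, hst⟩ := List.append_of_mem hm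
      exact ⟨s, t, by simpa using hst.symm⟩
    rw [mySplit_not_mem _ _ _ hmem]
    simp

theorem split_back_to_lines_eq_flatMap (joined_lines : List String) :
    split_back_to_lines joined_lines
      = joined_lines.flatMap (fun line => (mySplit '\n' [] line.toList).map String.ofList) := by
  unfold split_back_to_lines
  have hfun : (fun result line =>
      if PySem.Str.isIn "\n" line then
        result ++ (PySem.Str.split? line "\n").getD []
      else
        result ++ [line])
    = fun (result : List String) line =>
        result ++ (mySplit '\n' [] line.toList).map String.ofList := by
    funext result line
    rw [← a_line_eq line]
    split_ifs <;> rfl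
  rw [hfun, PySem.List.foldl_append_eq_flatMap]
  simp

-- ===== VERDICT (by name: the statement is the Claim_ definition above) =====
theorem split_back_to_lines_spec : Claim_equal_split_back_to_lines := by
  intro joined_lines _
  unfold Spec_split_back_to_lines split_back_to_lines_alt
  cases joined_lines with
  | nil => simp [split_back_to_lines]
  | cons p rest =>
      rw [split_back_to_lines_eq_flatMap]
      simp only [List.isEmpty_cons, Bool.false_eq_true, if_false]
      simp only [PySem.Str.split?, PySem.Str.toList_join]
      have hsep : ("\n" : String).toList = ['\n'] := rfl
      rw [hsep]
      simp only [PySem.Chars.split?, List.isEmpty_cons, Bool.false_eq_true, if_false]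
      have : PySem.Chars.join ['\n'] ((p :: rest).map String.toList)
           = PySem.Chars.join ['\n'] (p.toList :: rest.map String.toList) := by simp
      rw [this, splitOn_eq_mySplit, mySplit_intercalate]
      simp [List.flatMap_map, List.map_flatMap]
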